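-- pv_equiv track=rewrite | github.com/Monyzik/python-lab2 | src/classes/command.py | tokenization_command
-- ===== SOURCE A (Python) =====
-- def tokenization_command(command: str) -> list[str]:
--     """
--     Декомпозирует строку на отдельные блоки с учетом специальных символов, таких как: ', ", /.
--     :param command: Строка команды.
--     :return: Возвращает list[str] содержащий отдельные компоненты команды.
--     """
--     length = len(command)
--     result = []
--     i = 0
--     current = ""
--     while i < length:
--         if i + 1 < length and command[i] == '\\':
--             current += command[i + 1]
--             i += 1
--         elif command[i] == '\'':
--             i += 1
--             while i < length and command[i] != '\'':
--                 current += command[i]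
--                 i += 1
--         elif command[i] == '\"':
--             i += 1
--             while i < length and command[i] != '\"':
--                 current += command[i]
--                 i += 1
--         elif command[i] == ' ' or command[i] == '\t':
--             if current:
--                 result.append(current)
--             current = ""
--         else:
--             current += command[i]
--         i += 1
--     if current:
--         result.append(current)
--     return result
-- ===== SOURCE B (Python) =====
-- def tokenization_command(command: str) -> list[str]:
--     """Flat finite-state machine over the string: one loop, a state flag for
--     quote mode, instead of nested quote-scanning loops."""
--     NORMAL, SINGLE, DOUBLE = 0, 1, 2
--     state = NORMAL
--     current = ""
--     result = []
--     i = 0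
--     n = len(command)
--     while i < n:
--         c = command[i]
--         if state == NORMAL:
--             if c == '\\' and i + 1 < n:
--                 current += command[i + 1]
--                 i += 2
--                 continue
--             if c == "'":
--                 state = SINGLE
--             elif c == '"':
--                 state = DOUBLE
--             elif c == ' ' or c == '\t':
--                 if current:
--                     result.append(current)
--                 current = ""
--             else:
--                 current += c
--         elif state == SINGLE:
--             if c == "'":
--                 state = NORMAL
--             else:
--                 current += c
--         else:
--             if c == '"':
--                 state = NORMAL
--             else:
--                 current += c
--         i += 1
--     if current:
--         result.append(current)
--     return result
-- ===== Notes on version B (the rewrite author's own statement) =====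
-- stated objective: alternative
-- what changed: Replaced A's outer loop with nested inner quote-scanning while loops by a single flat finite-state machine over the string (state in {NORMAL, IN_SINGLE, IN_DOUBLE}) that accumulates tokens in one pass.
import Mathlib
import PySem

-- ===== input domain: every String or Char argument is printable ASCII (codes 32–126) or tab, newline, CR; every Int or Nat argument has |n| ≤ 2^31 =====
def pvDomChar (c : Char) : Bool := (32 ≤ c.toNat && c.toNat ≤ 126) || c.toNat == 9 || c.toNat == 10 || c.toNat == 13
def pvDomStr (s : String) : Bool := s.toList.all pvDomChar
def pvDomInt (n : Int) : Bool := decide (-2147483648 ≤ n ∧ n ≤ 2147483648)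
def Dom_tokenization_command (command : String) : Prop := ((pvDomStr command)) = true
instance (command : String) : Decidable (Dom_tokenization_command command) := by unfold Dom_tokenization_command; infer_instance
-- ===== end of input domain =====

-- B rewrites A's index loop with nested quote-scanning inner loops as one flat
-- finite-state machine (state ∈ {normal, in-single-quote, in-double-quote}); same
-- output, same cost (objective: alternative decomposition).

-- ===== PORT A =====
-- inner 'while i < length and command[i] != q' loop of A: consumes chars into cur
-- until the closing quote q (which is then skipped) or the end of the string
def pvQuoteA (q : Char) : List Char → String → String × List Char
  | [], cur => (cur, [])
  | c :: rest, cur => if c = q then (cur, rest) else pvQuoteA q rest (cur.push c)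

theorem pvQuoteA_len (q : Char) : ∀ (cs : List Char) (cur : String),
    (pvQuoteA q cs cur).2.length ≤ cs.length := by
  intro cs
  induction cs with
  | nil => intro cur; simp [pvQuoteA]
  | cons c rest ih =>
    intro cur
    simp only [pvQuoteA]
    split
    · simp
    · exact le_trans (ih _) (Nat.le_succ _)

-- A's outer while loop; 'rest.headD c' is command[i+1], guarded by rest ≠ []
-- so the default is never used
def pvLoopA : List Char → String → List String → List String
  | [], cur, res => if cur = "" then res else res ++ [cur]
  | c :: rest, cur, res =>
    if c = '\\' ∧ rest ≠ [] then
      pvLoopA rest.tail (cur.push (rest.headD c)) res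
    else if c = '\'' then
      pvLoopA (pvQuoteA '\'' rest cur).2 (pvQuoteA '\'' rest cur).1 res
    else if c = '"' then
      pvLoopA (pvQuoteA '"' rest cur).2 (pvQuoteA '"' rest cur).1 res
    else if c = ' ' ∨ c = '\t' then
      pvLoopA rest "" (if cur = "" then res else res ++ [cur])
    else
      pvLoopA rest (cur.push c) res
termination_by cs => cs.length
decreasing_by
  · cases rest with
    | nil => simp_all
    | cons d t => simp
  · exact Nat.lt_succ_of_le (pvQuoteA_len _ _ _)
  · exact Nat.lt_succ_of_le (pvQuoteA_len _ _ _)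
  · simp
  · simp

def tokenization_command (command : String) : List String :=
  pvLoopA command.toList "" []

-- ===== PORT B =====
inductive PvSt where
  | normal | insingle | indouble
deriving DecidableEq, Repr

-- B's single flat loop: one state flag instead of nested quote loops
def pvLoopB : List Char → PvSt → String → List String → List String
  | [], _, cur, res => if cur = "" then res else res ++ [cur]
  | c :: rest, PvSt.normal, cur, res =>
    if c = '\\' ∧ rest ≠ [] then
      pvLoopB rest.tail PvSt.normal (cur.push (rest.headD c)) res
    else if c = '\'' then
      pvLoopB rest PvSt.insingle cur res
    else if c = '"' then
      pvLoopB rest PvSt.indouble cur res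
    else if c = ' ' ∨ c = '\t' then
      pvLoopB rest PvSt.normal "" (if cur = "" then res else res ++ [cur])
    else
      pvLoopB rest PvSt.normal (cur.push c) res
  | c :: rest, PvSt.insingle, cur, res =>
    if c = '\'' then pvLoopB rest PvSt.normal cur res
    else pvLoopB rest PvSt.insingle (cur.push c) res
  | c :: rest, PvSt.indouble, cur, res =>
    if c = '"' then pvLoopB rest PvSt.normal cur res
    else pvLoopB rest PvSt.indouble (cur.push c) res
termination_by cs => cs.length
decreasing_by
  · cases rest with
    | nil => simp_all
    | cons d t => simp
  all_goals simp

def tokenization_command_alt (command : String) : List String :=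
  pvLoopB command.toList PvSt.normal "" []

-- ===== PRECONDITION & SPEC =====
def Spec_tokenization_command (command : String) (out : List String) : Prop := out = tokenization_command_alt command
instance (command : String) (out : List String) : Decidable (Spec_tokenization_command command out) := by unfold Spec_tokenization_command; infer_instance

-- ===== CLAIM (what is proved, stated in full; the proofs are below) =====
def Claim_equal_tokenization_command : Prop := ∀ (command : String), Dom_tokenization_command command → Spec_tokenization_command command (tokenization_command command)

-- ===== LEMMAS AND PROOFS =====

-- B in quote state runs exactly A's inner quote loop
theorem pvLoopB_quote (q : Char) (st : PvSt)
    (hst : st = PvSt.insingle ∧ q = '\'' ∨ st = PvSt.indouble ∧ q = '"') :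
    ∀ (cs : List Char) (cur : String) (res : List String),
    pvLoopB cs st cur res
      = pvLoopB (pvQuoteA q cs cur).2 PvSt.normal (pvQuoteA q cs cur).1 res := by
  intro cs
  induction cs with
  | nil =>
    intro cur res
    rcases hst with ⟨h, _⟩ | ⟨h, _⟩ <;> subst h <;> simp [pvLoopB, pvQuoteA]
  | cons c rest ih =>
    intro cur res
    rcases hst with ⟨h, hq⟩ | ⟨h, hq⟩ <;> subst h <;> subst hq <;>
      · simp only [pvLoopB, pvQuoteA]
        split
        · rfl
        · exact ih _ _

theorem pvLoop_eq : ∀ (n : ℕ) (cs : List Char), cs.length ≤ n →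
    ∀ (cur : String) (res : List String),
    pvLoopA cs cur res = pvLoopB cs PvSt.normal cur res := by
  intro n
  induction n with
  | zero =>
    intro cs h cur res
    have : cs = [] := List.eq_nil_of_length_eq_zero (Nat.le_zero.mp h)
    subst this
    simp [pvLoopA, pvLoopB]
  | succ n ih =>
    intro cs h cur res
    cases cs with
    | nil => simp [pvLoopA, pvLoopB]
    | cons c rest =>
      simp only [pvLoopA, pvLoopB]
      have hr : rest.length ≤ n := Nat.le_of_succ_le_succ (by simpa using h)
      split_ifs with h1 h2 h3 h4
      · exact ih _ (le_trans (by simp) hr) _ _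
      · rw [ih _ (le_trans (pvQuoteA_len _ _ _) hr) _ _]
        exact (pvLoopB_quote '\'' PvSt.insingle (Or.inl ⟨rfl, rfl⟩) rest cur res).symm
      · rw [ih _ (le_trans (pvQuoteA_len _ _ _) hr) _ _]
        exact (pvLoopB_quote '"' PvSt.indouble (Or.inr ⟨rfl, rfl⟩) rest cur res).symm
      · exact ih _ hr _ _
      · exact ih _ hr _ _
      · exact ih _ hr _ _

-- ===== VERDICT (by name: the statement is the Claim_ definition above) =====
theorem tokenization_command_spec : Claim_equal_tokenization_command := by
  intro command _
  unfold Spec_tokenization_command tokenization_command tokenization_command_alt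
  exact pvLoop_eq command.toList.length command.toList le_rfl "" []
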